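-- pv_equiv track=rewrite | github.com/manhlinhfs/omnimem | omni_chunking.py | _split_code_segments
-- ===== SOURCE A (Python) =====
-- def normalize_newlines(text):
--     return text.replace("\r\n", "\n").replace("\r", "\n")
--
-- def _split_code_segments(text):
--     lines = normalize_newlines(text).split("\n")
--     segments = []
--     current = []
--     for line in lines:
--         if not line.strip():
--             if current:
--                 segments.append("\n".join(current).strip())
--                 current = []
--             continue
--         current.append(line)
--     if current:
--         segments.append("\n".join(current).strip())
--     return [segment for segment in segments if segment]
-- ===== SOURCE B (Python) =====
-- def normalize_newlines(text):
--     return text.replace("\r\n", "\n").replace("\r", "\n")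
--
-- def _split_code_segments(text):
--     lines = normalize_newlines(text).split("\n")
--     n = len(lines)
--     segments = []
--     i = 0
--     while i < n:
--         if not lines[i].strip():
--             i += 1
--             continue
--         j = i + 1
--         while j < n and lines[j].strip():
--             j += 1
--         seg = "\n".join(lines[i:j]).strip()
--         if seg:
--             segments.append(seg)
--         i = j
--     return segments
-- ===== Notes on version B (the rewrite author's own statement) =====
-- stated objective: alternative
-- what changed: Replaces the accumulator-and-flush state machine with a two-pointer scan that locates each maximal run of non-blank lines, slices and joins it directly, and appends it guarded by a non-emptiness test instead of a trailing filter pass.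
import Mathlib
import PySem

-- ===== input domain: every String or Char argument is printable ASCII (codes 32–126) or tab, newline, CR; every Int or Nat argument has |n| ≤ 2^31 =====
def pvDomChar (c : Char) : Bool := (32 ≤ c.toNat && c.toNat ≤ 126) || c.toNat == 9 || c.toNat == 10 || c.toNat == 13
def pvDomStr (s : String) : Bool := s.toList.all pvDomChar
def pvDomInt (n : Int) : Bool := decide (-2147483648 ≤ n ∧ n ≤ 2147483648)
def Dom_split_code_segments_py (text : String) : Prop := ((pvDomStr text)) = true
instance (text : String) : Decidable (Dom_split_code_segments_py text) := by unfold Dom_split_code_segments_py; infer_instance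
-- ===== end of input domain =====

-- B replaces A's accumulator-and-flush state machine by a two-pointer scan over
-- maximal runs of non-blank lines (same output, proved equal; no speed claim).

-- ===== PORT A =====
def normalize_newlines_py (text : String) : String :=
  PySem.Str.replace (PySem.Str.replace text "\r\n" "\n") "\r" "\n"

-- .split("\n"): the separator is the non-empty literal "\n", so split? is always `some`
def pyLines (text : String) : List String :=
  (PySem.Str.split? (normalize_newlines_py text) "\n").getD []

-- one iteration of A's for-loop over (segments, current)
def stepA (st : List String × List String) (line : String) : List String × List String :=
  if PySem.Str.strip line = "" then
    if st.2 ≠ [] then (st.1 ++ [PySem.Str.strip (PySem.Str.join "\n" st.2)], []) else st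
  else (st.1, st.2 ++ [line])

def split_code_segments_py (text : String) : List String :=
  let lines := pyLines text
  let st := lines.foldl stepA ([], [])
  let segments :=
    if st.2 ≠ [] then st.1 ++ [PySem.Str.strip (PySem.Str.join "\n" st.2)] else st.1
  segments.filter (fun s => s ≠ "")

-- ===== PORT B =====
-- B's while loops, transcribed with a fuel parameter that merely makes them total:
-- each iteration moves the index forward, so fuel = n (resp. n + 1) always suffices.

-- inner while loop of B: advance j past the current run of non-blank lines
-- (index j is read with getD; B only reads it while j < n = lines.length)
def findEndB (lines : List String) (n : Nat) : Nat → Nat → Nat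
  | 0, j => j
  | fuel + 1, j =>
    if j < n ∧ PySem.Str.strip (lines.getD j "") ≠ "" then findEndB lines n fuel (j + 1) else j

-- outer while loop of B
def segLoopB (lines : List String) (n : Nat) : Nat → Nat → List String → List String
  | 0, _, segments => segments
  | fuel + 1, i, segments =>
    if i < n then
      if PySem.Str.strip (lines.getD i "") = "" then
        segLoopB lines n fuel (i + 1) segments
      else
        let j := findEndB lines n n (i + 1)
        let seg := PySem.Str.strip (PySem.Str.join "\n"
          (PySem.List.slice lines (some (i : Int)) (some (j : Int))))
        segLoopB lines n fuel j (if seg ≠ "" then segments ++ [seg] else segments)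
    else segments

def split_code_segments_py_alt (text : String) : List String :=
  let lines := pyLines text
  segLoopB lines lines.length (lines.length + 1) 0 []

-- ===== PRECONDITION & SPEC =====
def Spec_split_code_segments_py (text : String) (out : List String) : Prop := out = split_code_segments_py_alt text
instance (text : String) (out : List String) : Decidable (Spec_split_code_segments_py text out) := by unfold Spec_split_code_segments_py; infer_instance

-- ===== CLAIM (what is proved, stated in full; the proofs are below) =====
def Claim_equal_split_code_segments_py : Prop := ∀ (text : String), Dom_split_code_segments_py text → Spec_split_code_segments_py text (split_code_segments_py text)

-- ===== LEMMAS AND PROOFS =====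

-- common spec: segments are maximal runs of non-blank lines, joined, stripped, kept if non-empty
def nbB (l : String) : Bool := PySem.Str.strip l != ""

def filtOne (s : String) : List String := if s ≠ "" then [s] else []

def segsSpec : List String → List String
  | [] => []
  | l :: ls =>
    if PySem.Str.strip l = "" then segsSpec ls
    else
      filtOne (PySem.Str.strip (PySem.Str.join "\n" (l :: ls.takeWhile nbB))) ++
        segsSpec (ls.dropWhile nbB)
termination_by ls => ls.length
decreasing_by
  · simp
  · have := List.length_dropWhile_le nbB ls; simp; omega

theorem take_len_takeWhile {α : Type} (p : α → Bool) :
    ∀ ls : List α, ls.take (ls.takeWhile p).length = ls.takeWhile p := by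
  intro ls
  induction ls with
  | nil => rfl
  | cons l ls ih =>
    by_cases h : p l = true
    · simp [List.takeWhile_cons, h, ih]
    · simp [List.takeWhile_cons, h]

theorem drop_len_takeWhile {α : Type} (p : α → Bool) :
    ∀ ls : List α, ls.drop (ls.takeWhile p).length = ls.dropWhile p := by
  intro ls
  induction ls with
  | nil => rfl
  | cons l ls ih =>
    by_cases h : p l = true
    · simp [List.takeWhile_cons, List.dropWhile_cons, h, ih]
    · simp [List.takeWhile_cons, List.dropWhile_cons, h]

theorem findEndB_ge (lines : List String) (n : Nat) :
    ∀ fuel j, j ≤ findEndB lines n fuel j := by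
  intro fuel
  induction fuel with
  | zero => intro j; simp [findEndB]
  | succ fuel ih =>
    intro j
    rw [findEndB]
    split
    · have := ih (j + 1); omega
    · omega

theorem findEndB_eq (lines : List String) :
    ∀ fuel j, lines.length - j ≤ fuel →
      findEndB lines lines.length fuel j = j + ((lines.drop j).takeWhile nbB).length := by
  intro fuel
  induction fuel with
  | zero =>
    intro j hf
    rw [List.drop_eq_nil_of_le (by omega)]
    simp [findEndB]
  | succ fuel ih =>
    intro j hf
    rw [findEndB]
    by_cases hj : j < lines.length
    · have hg : lines.getD j "" = lines[j] := List.getD_eq_getElem lines "" hj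
      by_cases hnb : PySem.Str.strip (lines.getD j "") ≠ ""
      · rw [if_pos ⟨hj, hnb⟩, ih (j + 1) (by omega)]
        rw [hg] at hnb
        have hb : nbB lines[j] = true := by simp [nbB, hnb]
        rw [List.drop_eq_getElem_cons hj, List.takeWhile_cons, hb]
        simp; omega
      · rw [if_neg (by tauto)]
        rw [hg] at hnb
        have hb : nbB lines[j] = false := by simp [nbB]; tauto
        rw [List.drop_eq_getElem_cons hj, List.takeWhile_cons, hb]
        simp
    · rw [if_neg (by omega), List.drop_eq_nil_of_le (by omega)]
      simp

theorem segLoopB_eq (lines : List String) :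
    ∀ fuel i acc, lines.length - i < fuel →
      segLoopB lines lines.length fuel i acc = acc ++ segsSpec (lines.drop i) := by
  intro fuel
  induction fuel with
  | zero => omega
  | succ fuel ih =>
    intro i acc hf
    rw [segLoopB]
    by_cases hi : i < lines.length
    · rw [if_pos hi]
      have hg : lines.getD i "" = lines[i] := List.getD_eq_getElem lines "" hi
      by_cases hb : PySem.Str.strip (lines.getD i "") = ""
      · rw [if_pos hb, ih (i + 1) acc (by omega)]
        rw [hg] at hb
        rw [List.drop_eq_getElem_cons hi, segsSpec, if_pos hb]
      · rw [if_neg hb]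
        rw [hg] at hb
        have hfe := findEndB_eq lines lines.length (i + 1) (by omega)
        have hge := findEndB_ge lines lines.length lines.length (i + 1)
        rw [ih _ _ (by omega)]
        have hslice : PySem.List.slice lines (some (i : Int))
            (some ((findEndB lines lines.length lines.length (i + 1) : Nat) : Int))
            = lines[i] :: (lines.drop (i + 1)).takeWhile nbB := by
          rw [PySem.List.slice_natCast, hfe]
          have h1 : i + 1 + ((lines.drop (i + 1)).takeWhile nbB).length - i
              = ((lines.drop (i + 1)).takeWhile nbB).length + 1 := by omega
          rw [h1, List.drop_eq_getElem_cons hi, List.take_succ_cons, take_len_takeWhile]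
        have hdrop : lines.drop (findEndB lines lines.length lines.length (i + 1))
            = (lines.drop (i + 1)).dropWhile nbB := by
          rw [hfe, ← drop_len_takeWhile nbB (lines.drop (i + 1)), ← List.drop_drop]
        rw [hslice, hdrop]
        conv_rhs => rw [List.drop_eq_getElem_cons hi, segsSpec, if_neg hb]
        rw [filtOne]
        split <;> simp
    · rw [if_neg hi, List.drop_eq_nil_of_le (by omega), segsSpec]
      simp

theorem foldA_eq :
    ∀ (lines segs cur : List String),
      (let st := lines.foldl stepA (segs, cur);
       (if st.2 ≠ [] then st.1 ++ [PySem.Str.strip (PySem.Str.join "\n" st.2)] else st.1).filter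
         (fun s => s ≠ ""))
      = segs.filter (fun s => s ≠ "") ++
        (if cur = [] then segsSpec lines
         else filtOne (PySem.Str.strip (PySem.Str.join "\n" (cur ++ lines.takeWhile nbB))) ++
           segsSpec (lines.dropWhile nbB)) := by
  intro lines
  induction lines with
  | nil =>
    intro segs cur
    by_cases hc : cur = []
    · simp [hc, segsSpec]
    · simp only [List.foldl_nil]
      rw [if_pos hc, if_neg hc, List.filter_append]
      simp only [segsSpec, filtOne, List.filter, List.append_nil]
      by_cases h : PySem.Str.strip (PySem.Str.join "\n" cur) = "" <;> simp [h, segsSpec]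
  | cons l ls ih =>
    intro segs cur
    simp only [List.foldl_cons]
    by_cases hb : PySem.Str.strip l = ""
    · by_cases hc : cur = []
      · have hstep : stepA (segs, cur) l = (segs, cur) := by
          simp [stepA, hb, hc]
        rw [hstep, ih segs cur, if_pos hc, if_pos hc]
        rw [segsSpec, if_pos hb]
      · have hstep : stepA (segs, cur) l
            = (segs ++ [PySem.Str.strip (PySem.Str.join "\n" cur)], []) := by
          simp [stepA, hb, hc]
        rw [hstep, ih _ [], if_pos rfl, if_neg hc]
        have hnb : nbB l = false := by simp [nbB, hb]
        rw [List.takeWhile_cons, hnb]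
        simp only [Bool.false_eq_true, ite_false, List.append_nil]
        rw [List.dropWhile_cons]
        simp only [hnb, Bool.false_eq_true, ite_false]
        rw [List.filter_append, segsSpec, if_pos hb]
        simp only [filtOne, List.filter, List.append_assoc]
        by_cases h : PySem.Str.strip (PySem.Str.join "\n" cur) = "" <;> simp [h]
    · have hstep : stepA (segs, cur) l = (segs, cur ++ [l]) := by
        simp [stepA, hb]
      rw [hstep, ih segs (cur ++ [l]), if_neg (by simp)]
      have hnb : nbB l = true := by simp [nbB, hb]
      by_cases hc : cur = []
      · rw [if_pos hc, hc]
        conv_rhs => rw [segsSpec, if_neg hb]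
        simp
      · rw [if_neg hc, List.takeWhile_cons, hnb, List.dropWhile_cons, hnb]
        simp

-- ===== VERDICT (by name: the statement is the Claim_ definition above) =====
theorem split_code_segments_py_spec : Claim_equal_split_code_segments_py := by
  intro text _
  unfold Spec_split_code_segments_py split_code_segments_py split_code_segments_py_alt
  dsimp only
  rw [segLoopB_eq (pyLines text) ((pyLines text).length + 1) 0 [] (by omega), List.drop_zero,
    List.nil_append]
  have hA := foldA_eq (pyLines text) [] []
  rw [if_pos rfl] at hA
  simpa using hA
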